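-- pv_equiv track=rewrite | github.com/Kushagraw12/Competitive-Programming | Codeforces/648 div 2/A Matrix Game.py | solve
-- ===== SOURCE A (Python) =====
-- def solve(a):
--     row = len(a) - sum([1 if sum(row) > 0 else 0 for row in a])
--     col = len(a[0]) - sum([1 if sum([row[i] for row in a])
--                            > 0 else 0 for i in range(len(a[0]))])
--     minrc = min(row, col)
--     if minrc % 2:
--         return "Ashish"
--     return "Vivek"
-- ===== SOURCE B (Python) =====
-- def solve(a):
--     rows = [i for i in range(len(a)) if sum(a[i]) <= 0]
--     cols = [j for j in range(len(a[0])) if sum(r[j] for r in a) <= 0]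
--     player = 0
--     while rows and cols:
--         rows.pop()
--         cols.pop()
--         player ^= 1
--     return "Ashish" if player else "Vivek"
-- ===== Notes on version B (the rewrite author's own statement) =====
-- stated objective: alternative
-- what changed: B simulates the game itself: it builds the lists of empty-row and empty-column indices and plays moves in a loop, popping one row and one column per move and toggling the player, returning the player who made the last move, instead of A's closed-form parity test on min of two subtraction counts.
import Mathlib
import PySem

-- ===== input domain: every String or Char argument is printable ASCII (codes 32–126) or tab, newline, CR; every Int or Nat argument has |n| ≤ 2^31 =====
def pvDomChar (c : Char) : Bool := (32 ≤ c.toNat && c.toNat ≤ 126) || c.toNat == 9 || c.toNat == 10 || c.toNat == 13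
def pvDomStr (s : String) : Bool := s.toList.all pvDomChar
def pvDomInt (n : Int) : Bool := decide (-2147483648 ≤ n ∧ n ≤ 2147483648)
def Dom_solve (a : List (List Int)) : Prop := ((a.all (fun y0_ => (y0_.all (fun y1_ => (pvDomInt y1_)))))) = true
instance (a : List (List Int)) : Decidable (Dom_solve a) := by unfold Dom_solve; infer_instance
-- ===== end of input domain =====

-- B replaces A's closed-form parity test by a direct simulation of the game: it builds the
-- lists of empty-row/empty-column indices and plays the moves in a loop, popping one of each
-- per move and toggling the player (objective: alternative, same cost).


-- ===== PORT A =====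
def solve (a : List (List Int)) : String :=
  let row : Int := (a.length : Int) - (a.map (fun r => if r.sum > 0 then (1:Int) else 0)).sum
  -- a[0]: Pre_solve guarantees a ≠ [], so the getD default is never used
  let a0 : List Int := (PySem.List.pyGet? a 0).getD []
  let col : Int := (a0.length : Int) -
    ((PySem.List.pyRange 0 (a0.length : Int) 1).map (fun i =>
      if (a.map (fun r => PySem.List.pyGetD r i 0)).sum > 0 then (1:Int) else 0)).sum
  let minrc : Int := min row col
  if PySem.Int.mod minrc 2 ≠ 0 then "Ashish" else "Vivek"

-- ===== PORT B =====
-- the game loop: while rows and cols: pop the last element of each, toggle the player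
def simLoop (rows cols : List Int) (player : Nat) : Nat :=
  if rows = [] ∨ cols = [] then player
  else simLoop rows.dropLast cols.dropLast (player ^^^ 1)
termination_by rows.length
decreasing_by
  rename_i h
  have hne : rows ≠ [] := fun h0 => h (Or.inl h0)
  have : rows.length ≠ 0 := fun h0 => hne (List.eq_nil_of_length_eq_zero h0)
  simp only [List.length_dropLast]; omega

def solve_alt (a : List (List Int)) : String :=
  -- a[0]: Pre_solve guarantees a ≠ [], so the getD default is never used
  let a0 : List Int := (PySem.List.pyGet? a 0).getD []
  let rows : List Int := (PySem.List.pyRange 0 (a.length : Int) 1).filter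
    (fun i => decide ((PySem.List.pyGetD a i ([] : List Int)).sum ≤ 0))
  let cols : List Int := (PySem.List.pyRange 0 (a0.length : Int) 1).filter
    (fun j => decide ((a.map (fun r => PySem.List.pyGetD r j 0)).sum ≤ 0))
  if simLoop rows cols 0 ≠ 0 then "Ashish" else "Vivek"

-- ===== PRECONDITION & SPEC =====
-- Pre_ excludes exactly the inputs on which A raises IndexError: the empty matrix
-- (a[0] fails) and ragged matrices with a row shorter than a[0] (row[i] fails);
-- B raises there as well.
def Pre_solve (a : List (List Int)) : Prop :=
  a ≠ [] ∧ ∀ r ∈ a, a.headI.length ≤ r.length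
instance (a : List (List Int)) : Decidable (Pre_solve a) := by unfold Pre_solve; infer_instance
def pvWitness_solve : List (List Int) := [[1, 0], [0, 0]]
def Spec_solve (a : List (List Int)) (out : String) : Prop := out = solve_alt a
instance (a : List (List Int)) (out : String) : Decidable (Spec_solve a out) := by unfold Spec_solve; infer_instance

-- ===== CLAIM (what is proved, stated in full; the proofs are below) =====
def Claim_equal_solve : Prop := ∀ (a : List (List Int)), Dom_solve a → Pre_solve a → Spec_solve a (solve a)

-- ===== LEMMAS AND PROOFS =====

-- the game loop computes the parity of the number of moves, xor'd into the player
theorem simLoop_eq (rows cols : List Int) (p : Nat) :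
    simLoop rows cols p = p ^^^ (min rows.length cols.length % 2) := by
  fun_induction simLoop rows cols p with
  | case1 rows cols p h =>
      rcases h with h | h <;> subst h <;> simp
  | case2 rows cols p h ih =>
      have hr : rows ≠ [] := fun h0 => h (Or.inl h0)
      have hc : cols ≠ [] := fun h0 => h (Or.inr h0)
      have hr' : rows.length ≠ 0 := fun h0 => hr (List.eq_nil_of_length_eq_zero h0)
      have hc' : cols.length ≠ 0 := fun h0 => hc (List.eq_nil_of_length_eq_zero h0)
      rw [ih]
      have hmin : min rows.length cols.length
          = min rows.dropLast.length cols.dropLast.length + 1 := by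
        simp only [List.length_dropLast]; omega
      set m := min rows.dropLast.length cols.dropLast.length with hm
      rw [hmin, Nat.xor_assoc]
      congr 1
      rcases Nat.mod_two_eq_zero_or_one m with h2 | h2 <;> rw [Nat.add_mod, h2] <;> decide

-- the filtered index list over range(len xs) has as many elements as xs has members satisfying p
theorem filter_pyRange_len {α : Type} (xs : List α) (d : α) (p : α → Bool) :
    (((PySem.List.pyRange 0 (xs.length : Int) 1).filter
        (fun i => p (PySem.List.pyGetD xs i d))).length) = xs.countP p := by
  rw [← List.countP_eq_length_filter]
  conv_rhs => rw [← PySem.List.map_pyGetD_pyRange_zero (xs := xs) (d := d)]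
  rw [List.countP_map]
  rfl

-- counting the ≤0 elements is the length minus A's 0/1-sum over the >0 elements
theorem count_le_eq {α : Type} (l : List α) (v : α → Int) :
    ((l.countP (fun x => decide (v x ≤ 0))) : Int)
      = (l.length : Int) - (l.map (fun x => if v x > 0 then (1:Int) else 0)).sum := by
  induction l with
  | nil => simp
  | cons x t ih =>
      by_cases h : v x > 0
      · have h' : ¬ (v x ≤ 0) := by omega
        simp [h, h', ih]
        ring
      · have h' : v x ≤ 0 := by omega
        simp [h, h', ih]
        ring

-- ===== VERDICT (by name: the statement is the Claim_ definition above) =====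
theorem solve_spec : Claim_equal_solve := by
  intro a _ _
  unfold Spec_solve
  simp only [solve, solve_alt]
  rw [simLoop_eq, Nat.zero_xor]
  set a0 : List Int := (PySem.List.pyGet? a 0).getD [] with ha0
  have hrows : ((((PySem.List.pyRange 0 (a.length : Int) 1).filter
      (fun i => decide ((PySem.List.pyGetD a i ([] : List Int)).sum ≤ 0))).length : Nat) : Int)
      = (a.length : Int) - (a.map (fun r => if r.sum > 0 then (1:Int) else 0)).sum := by
    rw [filter_pyRange_len a ([] : List Int) (fun r => decide (r.sum ≤ 0))]
    exact count_le_eq a (fun r => r.sum)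
  have hcols : ((((PySem.List.pyRange 0 (a0.length : Int) 1).filter
      (fun j => decide ((a.map (fun r => PySem.List.pyGetD r j 0)).sum ≤ 0))).length : Nat) : Int)
      = (a0.length : Int) - ((PySem.List.pyRange 0 (a0.length : Int) 1).map (fun i =>
        if (a.map (fun r => PySem.List.pyGetD r i 0)).sum > 0 then (1:Int) else 0)).sum := by
    rw [← List.countP_eq_length_filter,
        count_le_eq (PySem.List.pyRange 0 (a0.length : Int) 1)
          (fun j => (a.map (fun r => PySem.List.pyGetD r j 0)).sum)]
    congr 1
    rw [PySem.List.length_pyRange_one]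
    omega
  rw [← hrows, ← hcols, ← Nat.cast_min,
      show ((2:Int)) = ((2:Nat):Int) by norm_num, PySem.Int.mod_natCast]
  norm_cast
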